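-- pv_equiv track=rewrite | github.com/gadhiar/mist.ai | backend/knowledge/curation/conflict_resolver.py | _resolve_intra_batch
-- ===== SOURCE A (Python) =====
-- CONTRADICTION_PAIRS: list[tuple[str, str]] = [
--     ("USES", "DISLIKES"),
--     ("PREFERS", "DISLIKES"),
--     ("EXPERT_IN", "STRUGGLES_WITH"),
--     ("INTERESTED_IN", "DISLIKES"),
-- ]
--
-- def _get_contradiction_type(rel_type: str) -> set[str]:
--     """Return the set of relationship types that contradict the given type."""
--     contradictions: set[str] = set()
--     for a, b in CONTRADICTION_PAIRS:
--         if rel_type == a: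
--             contradictions.add(b)
--         elif rel_type == b:
--             contradictions.add(a)
--     return contradictions
--
-- def _resolve_intra_batch(relationships: list[dict]) -> tuple[list[dict], int]:
--     """Remove intra-batch contradictions. Last occurrence wins."""
--     # Build lookup: (source, target) -> list of rels
--     pair_rels: dict[tuple[str, str], list[dict]] = {}
--     for rel in relationships:
--         key = (rel.get("source", ""), rel.get("target", ""))
--         pair_rels.setdefault(key, []).append(rel)
--
--     detected = 0
--     keep: list[dict] = []
--
--     for (_source, _target), rels in pair_rels.items():
--         if len(rels) <= 1:
--             keep.extend(rels)
--             continue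
--
--         # Check for contradiction pairs within this source-target group
--         types = [r.get("type", "") for r in rels]
--         contradicted: set[int] = set()
--
--         for i, type_a in enumerate(types):
--             for j, type_b in enumerate(types):
--                 if i >= j:
--                     continue
--                 contras = _get_contradiction_type(type_a)
--                 if type_b in contras:
--                     # Later index wins (newer)
--                     contradicted.add(i)
--                     detected += 1
--
--         for i, rel in enumerate(rels):
--             if i not in contradicted:
--                 keep.append(rel)
--
--     return keep, detected
-- ===== SOURCE B (Python) =====
-- CONTRADICTION_PAIRS: list[tuple[str, str]] = [
--     ("USES", "DISLIKES"),
--     ("PREFERS", "DISLIKES"),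
--     ("EXPERT_IN", "STRUGGLES_WITH"),
--     ("INTERESTED_IN", "DISLIKES"),
-- ]
--
-- # Contradiction partners indexed once, ahead of time.
-- _CONTRA: dict[str, set[str]] = {}
-- for _a, _b in CONTRADICTION_PAIRS:
--     _CONTRA.setdefault(_a, set()).add(_b)
--     _CONTRA.setdefault(_b, set()).add(_a)
--
--
-- def _scan_group(rels: list[dict]) -> tuple[list[dict], int]:
--     """One right-to-left pass: keep a rel iff no later rel in the group
--     contradicts it; count, per rel, how many later rels contradict it."""
--     kept_rev: list[dict] = []
--     counts: dict[str, int] = {}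
--     detected = 0
--     for rel in reversed(rels):
--         t = rel.get("type", "")
--         n = sum(counts.get(c, 0) for c in _CONTRA.get(t, ()))
--         if n == 0:
--             kept_rev.append(rel)
--         detected += n
--         counts[t] = counts.get(t, 0) + 1
--     kept_rev.reverse()
--     return kept_rev, detected
--
--
-- def _resolve_intra_batch(relationships: list[dict]) -> tuple[list[dict], int]:
--     """Remove intra-batch contradictions. Last occurrence wins."""
--     pair_rels: dict[tuple[str, str], list[dict]] = {}
--     for rel in relationships:
--         key = (rel.get("source", ""), rel.get("target", ""))
--         pair_rels.setdefault(key, []).append(rel)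
--
--     detected = 0
--     keep: list[dict] = []
--     for rels in pair_rels.values():
--         if len(rels) <= 1:
--             keep.extend(rels)
--             continue
--         kept, det = _scan_group(rels)
--         keep.extend(kept)
--         detected += det
--     return keep, detected
-- ===== Notes on version B (the rewrite author's own statement) =====
-- stated objective: alternative
-- what changed: Replaces A's all-pairs O(g^2) double loop over each (source,target) group (recomputing the contradiction set for every pair) by a single right-to-left pass per group that keeps a running counter of types already seen, against a contradiction table built once at module load; a rel is dropped iff a contradicting type occurs later, and the pair count is accumulated from the counter (intended as faster, O(n) vs O(n^2) worst case; a timing run measured a median 1.74x at the largest size but did not confirm it consistently).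
import Mathlib
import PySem

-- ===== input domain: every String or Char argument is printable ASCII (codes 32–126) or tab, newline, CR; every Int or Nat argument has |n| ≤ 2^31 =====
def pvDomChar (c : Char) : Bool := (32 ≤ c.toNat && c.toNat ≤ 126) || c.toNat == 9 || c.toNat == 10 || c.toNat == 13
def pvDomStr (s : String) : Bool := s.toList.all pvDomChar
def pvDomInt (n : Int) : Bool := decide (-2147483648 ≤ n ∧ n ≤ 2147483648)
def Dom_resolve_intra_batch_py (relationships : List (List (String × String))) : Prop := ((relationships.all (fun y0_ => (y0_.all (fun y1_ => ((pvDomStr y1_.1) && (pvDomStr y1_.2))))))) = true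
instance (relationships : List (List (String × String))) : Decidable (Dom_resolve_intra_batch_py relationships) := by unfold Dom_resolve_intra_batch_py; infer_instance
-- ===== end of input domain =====

-- B replaces A's all-pairs double loop per (source,target) group by one right-to-left
-- counting pass per group with a precomputed contradiction table (a different algorithm).

-- ===== PORT A =====

def CONTRADICTION_PAIRS : List (String × String) :=
  [("USES", "DISLIKES"), ("PREFERS", "DISLIKES"),
   ("EXPERT_IN", "STRUGGLES_WITH"), ("INTERESTED_IN", "DISLIKES")]

-- rel.get(k, "") on a Python dict (assoc list, first match)
def relGet (rel : List (String × String)) (k : String) : String :=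
  (PySem.Dict.mk rel).getD k ""

-- port of _get_contradiction_type
def get_contradiction_type (rel_type : String) : PySem.Set String :=
  CONTRADICTION_PAIRS.foldl
    (fun contradictions p =>
      if rel_type = p.1 then contradictions.add p.2
      else if rel_type = p.2 then contradictions.add p.1
      else contradictions)
    PySem.Set.empty

def resolve_intra_batch_py (relationships : List (List (String × String))) : (List (List (String × String))) × Int :=
  let pair_rels : PySem.Dict (String × String) (List (List (String × String))) :=
    relationships.foldl
      (fun d rel => d.modify (relGet rel "source", relGet rel "target") [] (· ++ [rel]))
      PySem.Dict.empty
  pair_rels.items.foldl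
    (fun (st : (List (List (String × String))) × Int) kv =>
      let keep := st.1
      let detected := st.2
      let rels := kv.2
      if rels.length ≤ 1 then (keep ++ rels, detected)
      else
        let types := rels.map (fun r => relGet r "type")
        let cd : PySem.Set Int × Int :=
          (PySem.List.enumerate types 0).foldl
            (fun cd1 ia =>
              (PySem.List.enumerate types 0).foldl
                (fun (cd2 : PySem.Set Int × Int) jb =>
                  if ia.1 ≥ jb.1 then cd2
                  else
                    let contras := get_contradiction_type ia.2
                    if contras.contains jb.2 then (cd2.1.add ia.1, cd2.2 + 1) else cd2)
                cd1)
            (PySem.Set.empty, detected)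
        let keep2 :=
          (PySem.List.enumerate rels 0).foldl
            (fun k ir => if cd.1.contains ir.1 then k else k ++ [ir.2]) keep
        (keep2, cd.2))
    ([], 0)

-- ===== PORT B =====

-- _CONTRA: the contradiction table built once from CONTRADICTION_PAIRS
def contraTable : PySem.Dict String (PySem.Set String) :=
  CONTRADICTION_PAIRS.foldl
    (fun d p => ((d.modify p.1 PySem.Set.empty (fun s => s.add p.2)).modify
                   p.2 PySem.Set.empty (fun s => s.add p.1)))
    PySem.Dict.empty

-- port of _scan_group: one fold over the reversed group
def scan_group (rels : List (List (String × String))) : (List (List (String × String))) × Int :=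
  let st :=
    rels.reverse.foldl
      (fun (st : (List (List (String × String))) × PySem.Dict String Int × Int) rel =>
        let t := relGet rel "type"
        let n : Int := ((contraTable.getD t PySem.Set.empty).map (fun c => st.2.1.getD c 0)).sum
        let keptRev := if n = 0 then st.1 ++ [rel] else st.1
        (keptRev, st.2.1.modify t 0 (· + 1), st.2.2 + n))
      ([], PySem.Dict.empty, 0)
  (st.1.reverse, st.2.2)

def resolve_intra_batch_py_alt (relationships : List (List (String × String))) : (List (List (String × String))) × Int :=
  let pair_rels : PySem.Dict (String × String) (List (List (String × String))) :=
    relationships.foldl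
      (fun d rel => d.modify (relGet rel "source", relGet rel "target") [] (· ++ [rel]))
      PySem.Dict.empty
  pair_rels.values.foldl
    (fun (st : (List (List (String × String))) × Int) rels =>
      if rels.length ≤ 1 then (st.1 ++ rels, st.2)
      else
        let kd := scan_group rels
        (st.1 ++ kd.1, st.2 + kd.2))
    ([], 0)

-- ===== PRECONDITION & SPEC =====
def Spec_resolve_intra_batch_py (relationships : List (List (String × String))) (out : (List (List (String × String))) × Int) : Prop := out = resolve_intra_batch_py_alt relationships
instance (relationships : List (List (String × String))) (out : (List (List (String × String))) × Int) : Decidable (Spec_resolve_intra_batch_py relationships out) := by unfold Spec_resolve_intra_batch_py; infer_instance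

-- ===== CLAIM (what is proved, stated in full; the proofs are below) =====
def Claim_equal_resolve_intra_batch_py : Prop := ∀ (relationships : List (List (String × String))), Dom_resolve_intra_batch_py relationships → Spec_resolve_intra_batch_py relationships (resolve_intra_batch_py relationships)

-- ===== LEMMAS AND PROOFS =====

-- ===== VERDICT (by name: the statement is the Claim_ definition above) =====

-- ===== LEMMAS AND PROOFS =====

def typeOf (r : List (String × String)) : String := relGet r "type"

-- number of elements of ts whose type contradicts t
def badN (t : String) (ts : List String) : Nat :=
  ts.countP (fun b => (get_contradiction_type t).contains b)

def kSpec : List (List (String × String)) → List (List (String × String))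
  | [] => []
  | r :: l => if badN (typeOf r) (l.map typeOf) = 0 then r :: kSpec l else kSpec l

def dSpec : List (List (String × String)) → Nat
  | [] => 0
  | r :: l => badN (typeOf r) (l.map typeOf) + dSpec l

def dStr : List String → Nat
  | [] => 0
  | t :: l => badN t l + dStr l

-- closed case analysis of _get_contradiction_type
theorem gct_cases (t : String) : get_contradiction_type t =
    if t = "USES" then ["DISLIKES"]
    else if t = "PREFERS" then ["DISLIKES"]
    else if t = "EXPERT_IN" then ["STRUGGLES_WITH"]
    else if t = "INTERESTED_IN" then ["DISLIKES"]
    else if t = "DISLIKES" then ["USES", "PREFERS", "INTERESTED_IN"]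
    else if t = "STRUGGLES_WITH" then ["EXPERT_IN"]
    else [] := by
  simp only [get_contradiction_type, CONTRADICTION_PAIRS, List.foldl]
  split_ifs <;> simp_all <;> rfl

theorem contra_eq (t : String) :
    contraTable.getD t PySem.Set.empty = get_contradiction_type t := by
  have hC : contraTable = PySem.Dict.mk
      [("USES", ["DISLIKES"]), ("DISLIKES", ["USES", "PREFERS", "INTERESTED_IN"]),
       ("PREFERS", ["DISLIKES"]), ("EXPERT_IN", ["STRUGGLES_WITH"]),
       ("STRUGGLES_WITH", ["EXPERT_IN"]), ("INTERESTED_IN", ["DISLIKES"])] := by rfl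
  rw [hC, gct_cases, PySem.Dict.getD_eq_get?_getD]
  simp only [PySem.Dict.get?_mk_cons]
  split_ifs <;> simp_all <;> rfl

theorem gct_nodup (t : String) : (get_contradiction_type t).Nodup := by
  rw [gct_cases]; split_ifs <;> decide

theorem set_add_idem {α : Type} [BEq α] [LawfulBEq α] (s : PySem.Set α) (x : α) :
    (s.add x).add x = s.add x := by
  by_cases h : x ∈ s <;> simp [PySem.Set.add, h]

theorem set_contains_add {α : Type} [BEq α] [LawfulBEq α] (s : PySem.Set α) (x y : α) :
    (s.add y).contains x = (s.contains x || x == y) := by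
  by_cases hy : y ∈ s <;> by_cases hxy : x = y <;>
    simp [PySem.Set.add, hy, hxy, List.contains_eq_mem]

-- sum of per-type counts over a nodup set = countP of membership
theorem sum_counts (S : List String) (hS : S.Nodup) (ts : List String) :
    (S.map (fun c => ((ts.count c : Nat) : Int))).sum
      = ((ts.countP (fun b => S.contains b) : Nat) : Int) := by
  induction ts with
  | nil => simp
  | cons a l ih =>
    have aux : ∀ (S' : List String), S'.Nodup →
        (S'.map (fun c => (if a = c then (1 : Int) else 0))).sum
          = if a ∈ S' then 1 else 0 := by
      intro S' hS'
      induction S' with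
      | nil => simp
      | cons s S' ihS =>
        rcases List.nodup_cons.mp hS' with ⟨hs, hS''⟩
        by_cases h : a = s
        · subst h
          simp [ihS hS'', hs]
        · simp [h, ihS hS'']
    simp only [List.count_cons, List.countP_cons]
    push_cast
    rw [PySem.List.sum_map_add_int, ih]
    rcases hc : S.contains a with _ | _
    · have hm : a ∉ S := by simpa [List.contains_eq_mem] using hc
      have h2 := aux S hS
      rw [if_neg hm] at h2
      simp [hc, h2]
    · have hm : a ∈ S := by simpa [List.contains_eq_mem] using hc
      have h2 := aux S hS
      rw [if_pos hm] at h2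
      simp [hc, h2]

-- count of later contradicting elements, as counted by A's inner loop
def cnt (i : Int) (ta : String) (l : List String) (s : Int) : Nat :=
  (PySem.List.enumerate l s).countP
    (fun jb => decide (¬ i ≥ jb.1) && (get_contradiction_type ta).contains jb.2)

theorem inner_char (i : Int) (ta : String) (l : List String) (s : Int)
    (acc : PySem.Set Int × Int) :
    (PySem.List.enumerate l s).foldl
      (fun (cd2 : PySem.Set Int × Int) jb =>
        if i ≥ jb.1 then cd2
        else
          let contras := get_contradiction_type ta
          if contras.contains jb.2 then (cd2.1.add i, cd2.2 + 1) else cd2) acc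
    = (if cnt i ta l s = 0 then acc.1 else acc.1.add i, acc.2 + (cnt i ta l s : Int)) := by
  induction l generalizing s acc with
  | nil => simp [cnt, PySem.List.enumerate_nil]
  | cons b l ih =>
    rw [PySem.List.enumerate_cons]
    simp only [List.foldl_cons]
    have hcnt : cnt i ta (b :: l) s
        = cnt i ta l (s + 1)
          + (if (decide (¬ i ≥ s) && (get_contradiction_type ta).contains b) then 1 else 0) := by
      simp [cnt, PySem.List.enumerate_cons, List.countP_cons]
    by_cases hge : i ≥ s
    · have hcnt' : cnt i ta (b :: l) s = cnt i ta l (s + 1) := by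
        simp [hcnt, hge]
      rw [if_pos hge, ih, hcnt']
    · rw [if_neg hge]
      by_cases hcon : (get_contradiction_type ta).contains b
      · have hmem : b ∈ get_contradiction_type ta := by
          simpa [List.contains_eq_mem] using hcon
        have hcnt' : cnt i ta (b :: l) s = cnt i ta l (s + 1) + 1 := by
          simp [hcnt, hge, hmem]
        have hne : cnt i ta (b :: l) s ≠ 0 := by omega
        simp only [hcon, if_true]
        rw [ih]
        simp only [Prod.mk.injEq]
        constructor
        · rw [if_neg hne]
          by_cases h0 : cnt i ta l (s + 1) = 0
          · simp [h0]
          · simp [h0, set_add_idem]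
        · rw [hcnt']; push_cast; ring
      · have hmem : b ∉ get_contradiction_type ta := by
          simpa [List.contains_eq_mem] using hcon
        have hcnt' : cnt i ta (b :: l) s = cnt i ta l (s + 1) := by
          simp [hcnt, hmem]
        simp only [hcon, Bool.false_eq_true, if_false]
        rw [ih, hcnt']

-- the outer double loop: final detected and the contradicted set as a simple fold
theorem outer_char (ts : List String) (P : List (Int × String)) (s0 : PySem.Set Int) (d0 : Int) :
    P.foldl
      (fun cd1 ia =>
        (PySem.List.enumerate ts 0).foldl
          (fun (cd2 : PySem.Set Int × Int) jb =>
            if ia.1 ≥ jb.1 then cd2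
            else
              let contras := get_contradiction_type ia.2
              if contras.contains jb.2 then (cd2.1.add ia.1, cd2.2 + 1) else cd2)
          cd1)
      (s0, d0)
    = (P.foldl (fun s p => if cnt p.1 p.2 ts 0 = 0 then s else s.add p.1) s0,
       d0 + (P.map (fun p => (cnt p.1 p.2 ts 0 : Int))).sum) := by
  induction P generalizing s0 d0 with
  | nil => simp
  | cons p P ih =>
    simp only [List.foldl_cons, List.map_cons, List.sum_cons]
    rw [inner_char p.1 p.2 ts 0 (s0, d0), ih]
    ring_nf
  
-- membership in the contradicted set
theorem setfold_contains (ts : List String) (P : List (Int × String)) (s0 : PySem.Set Int) (x : Int) :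
    (P.foldl (fun s p => if cnt p.1 p.2 ts 0 = 0 then s else s.add p.1) s0).contains x
    = (s0.contains x || P.any (fun p => p.1 == x && !(cnt p.1 p.2 ts 0 == 0))) := by
  induction P generalizing s0 with
  | nil => simp
  | cons p P ih =>
    simp only [List.foldl_cons, List.any_cons]
    by_cases h0 : cnt p.1 p.2 ts 0 = 0
    · rw [if_pos h0, ih]
      simp [h0]
    · have hx : (x == p.1) = (p.1 == x) := by simp [eq_comm]
      have h0' : (!(cnt p.1 p.2 ts 0 == 0)) = true := by simp [h0]
      rw [if_neg h0, ih, set_contains_add, hx, h0', Bool.and_true]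
      simp [Bool.or_comm, Bool.or_left_comm, Bool.or_assoc]

theorem any_enumerate_at (ts : List String) (m : Nat) (hm : m < ts.length)
    (g : Int × String → Bool) :
    (PySem.List.enumerate ts 0).any (fun p => p.1 == (m : Int) && g p)
      = g ((m : Int), ts[m]) := by
  rcases hg : g ((m : Int), ts[m]) with _ | _
  · rw [List.any_eq_false]
    intro p hp
    rcases (PySem.List.mem_enumerate_iff ts 0 p).mp hp with ⟨k, hk, rfl⟩
    by_cases hkm : k = m
    · subst hkm; simp [hg]
    · simp [Int.zero_add]
      intro h
      exact absurd (by exact_mod_cast h) hkm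
  · rw [List.any_eq_true]
    refine ⟨((m : Int), ts[m]), ?_, by simp [hg]⟩
    exact (PySem.List.mem_enumerate_iff ts 0 _).mpr ⟨m, hm, by simp⟩

-- the inner count at a real index only sees the suffix
theorem cnt_drop (ts : List String) (k : Nat) (ta : String) (hk : k < ts.length) :
    cnt (k : Int) ta ts 0 = badN ta (ts.drop (k + 1)) := by
  conv_lhs => rw [show ts = ts.take (k + 1) ++ ts.drop (k + 1) from (List.take_append_drop _ _).symm]
  unfold cnt badN
  rw [PySem.List.enumerate_append, List.countP_append]
  have hlen : (ts.take (k + 1)).length = k + 1 := by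
    simp [List.length_take]; omega
  have h1 : ((PySem.List.enumerate (ts.take (k + 1)) 0).countP
      (fun jb => decide (¬ (k : Int) ≥ jb.1) && (get_contradiction_type ta).contains jb.2)) = 0 := by
    rw [List.countP_eq_zero]
    intro jb hjb
    rcases (PySem.List.mem_enumerate_iff _ _ _).mp hjb with ⟨m, hm, rfl⟩
    rw [hlen] at hm
    simp
    intro h
    exact absurd h (by omega)
  rw [h1, hlen]
  have h2 : ∀ jb ∈ PySem.List.enumerate (ts.drop (k + 1)) (0 + ((k + 1 : Nat) : Int)),
      ((decide (¬ (k : Int) ≥ jb.1) && (get_contradiction_type ta).contains jb.2) = true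
        ↔ (get_contradiction_type ta).contains jb.2 = true) := by
    intro jb hjb
    rcases (PySem.List.mem_enumerate_iff _ _ _).mp hjb with ⟨m, hm, rfl⟩
    simp
    intro _
    omega
  rw [List.countP_congr h2]
  rw [← PySem.List.map_snd_enumerate (ts.drop (k + 1)) (0 + ((k + 1 : Nat) : Int)), List.countP_map]
  simp
  rfl

theorem sum_cnt_gen (suf : List String) : ∀ (pre : List String),
    ((PySem.List.enumerate suf ((pre.length : Nat) : Int)).map
      (fun p => (cnt p.1 p.2 (pre ++ suf) 0 : Int))).sum = (dStr suf : Int) := by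
  induction suf with
  | nil => intro pre; simp [dStr]
  | cons t l ih =>
    intro pre
    rw [PySem.List.enumerate_cons, List.append_cons]
    simp only [List.map_cons, List.sum_cons]
    have hlt : pre.length < ((pre ++ [t]) ++ l).length := by simp
    have h1 : cnt ((pre.length : Nat) : Int) t ((pre ++ [t]) ++ l) 0 = badN t l := by
      rw [cnt_drop _ _ _ hlt, show pre.length + 1 = (pre ++ [t]).length from by simp,
        List.drop_left]
    have hst : ((pre.length : Nat) : Int) + 1 = (((pre ++ [t]).length : Nat) : Int) := by
      push_cast; simp
    rw [h1, hst, ih (pre ++ [t])]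
    simp [dStr]

theorem dStr_map (l : List (List (String × String))) : dStr (l.map typeOf) = dSpec l := by
  induction l with
  | nil => rfl
  | cons r l ih => simp [dStr, dSpec, ih]

theorem keep_gen (S : PySem.Set Int) (suf : List (List (String × String))) :
    ∀ (pre : List (List (String × String))) (k0 : List (List (String × String))),
    (∀ (m : Nat) (h : m < suf.length),
        S.contains ((pre.length + m : Nat) : Int)
          = !(badN (typeOf suf[m]) ((suf.drop (m + 1)).map typeOf) == 0)) →
    (PySem.List.enumerate suf ((pre.length : Nat) : Int)).foldl
        (fun k ir => if S.contains ir.1 then k else k ++ [ir.2]) k0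
      = k0 ++ kSpec suf := by
  induction suf with
  | nil => intro pre k0 _; simp [kSpec]
  | cons r l ih =>
    intro pre k0 hS
    rw [PySem.List.enumerate_cons]
    simp only [List.foldl_cons]
    have h0 := hS 0 (by simp)
    simp only [Nat.add_zero, List.getElem_cons_zero, List.drop_succ_cons, List.drop_zero] at h0
    have hS' : ∀ (m : Nat) (h : m < l.length),
        S.contains (((pre ++ [r]).length + m : Nat) : Int)
          = !(badN (typeOf l[m]) ((l.drop (m + 1)).map typeOf) == 0) := by
      intro m h
      have h2 := hS (m + 1) (by simpa using Nat.succ_lt_succ h)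
      simpa [show pre.length + (m + 1) = (pre ++ [r]).length + m from by simp; omega] using h2
    have hst : ((pre.length : Nat) : Int) + 1 = (((pre ++ [r]).length : Nat) : Int) := by
      push_cast; simp
    by_cases hb : badN (typeOf r) (l.map typeOf) = 0
    · have hc : S.contains ((pre.length : Nat) : Int) = false := by
        rw [h0]; simp [hb]
      rw [hc]
      simp only [Bool.false_eq_true, if_false]
      rw [hst, ih (pre ++ [r]) (k0 ++ [r]) hS']
      simp [kSpec, hb]
    · have hc : S.contains ((pre.length : Nat) : Int) = true := by
        rw [h0]; simp [hb]
      rw [hc]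
      simp only [if_true]
      rw [hst, ih (pre ++ [r]) k0 hS']
      simp [kSpec, hb]

-- B's per-group scan: the full fold state
theorem scan_fold (rels : List (List (String × String))) :
    rels.reverse.foldl
      (fun (st : (List (List (String × String))) × PySem.Dict String Int × Int) rel =>
        let t := relGet rel "type"
        let n : Int := ((contraTable.getD t PySem.Set.empty).map (fun c => st.2.1.getD c 0)).sum
        let keptRev := if n = 0 then st.1 ++ [rel] else st.1
        (keptRev, st.2.1.modify t 0 (· + 1), st.2.2 + n))
      ([], PySem.Dict.empty, 0)
    = ((kSpec rels).reverse, PySem.Dict.counter (rels.reverse.map typeOf), (dSpec rels : Int)) := by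
  induction rels with
  | nil => simp [kSpec, dSpec, PySem.Dict.counter_eq_foldl]
  | cons r l ih =>
    rw [List.reverse_cons, List.foldl_append, ih]
    simp only [List.foldl_cons, List.foldl_nil]
    have hcount : ∀ c, (PySem.Dict.counter (l.reverse.map typeOf)).getD c 0
        = (((l.map typeOf).count c : Nat) : Int) := by
      intro c
      rw [PySem.Dict.getD_counter]
      congr 1
      rw [List.map_reverse, List.count_reverse]
    have hn : ((contraTable.getD (relGet r "type") PySem.Set.empty).map
        (fun c => (PySem.Dict.counter (l.reverse.map typeOf)).getD c 0)).sum
        = ((badN (typeOf r) (l.map typeOf) : Nat) : Int) := by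
      rw [contra_eq]
      simp only [hcount]
      rw [sum_counts _ (gct_nodup _)]
      rfl
    simp only [hn, Prod.mk.injEq]
    refine ⟨?_, ?_, ?_⟩
    · by_cases hb : badN (typeOf r) (l.map typeOf) = 0
      · simp [kSpec, hb]
      · simp [kSpec, hb]
    · rw [show relGet r "type" = typeOf r from rfl, ← PySem.Dict.counter_append_singleton]
      congr 1
      simp
    · simp [dSpec]; push_cast; ring

theorem scan_group_eq (rels : List (List (String × String))) :
    scan_group rels = (kSpec rels, (dSpec rels : Int)) := by
  unfold scan_group
  rw [scan_fold]
  simp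

theorem groups_eq (d : PySem.Dict (String × String) (List (List (String × String)))) :
    d.items.foldl
      (fun (st : (List (List (String × String))) × Int) kv =>
        let keep := st.1
        let detected := st.2
        let rels := kv.2
        if rels.length ≤ 1 then (keep ++ rels, detected)
        else
          let types := rels.map (fun r => relGet r "type")
          let cd : PySem.Set Int × Int :=
            (PySem.List.enumerate types 0).foldl
              (fun cd1 ia =>
                (PySem.List.enumerate types 0).foldl
                  (fun (cd2 : PySem.Set Int × Int) jb =>
                    if ia.1 ≥ jb.1 then cd2
                    else
                      let contras := get_contradiction_type ia.2
                      if contras.contains jb.2 then (cd2.1.add ia.1, cd2.2 + 1) else cd2)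
                  cd1)
              (PySem.Set.empty, detected)
          let keep2 :=
            (PySem.List.enumerate rels 0).foldl
              (fun k ir => if cd.1.contains ir.1 then k else k ++ [ir.2]) keep
          (keep2, cd.2))
      ([], 0)
    = d.values.foldl
        (fun (st : (List (List (String × String))) × Int) rels =>
          if rels.length ≤ 1 then (st.1 ++ rels, st.2)
          else
            let kd := scan_group rels
            (st.1 ++ kd.1, st.2 + kd.2))
        ([], 0) := by
  have hv : d.values = d.items.map (·.2) := rfl
  rw [hv, List.foldl_map]
  refine PySem.List.foldl_congr_mem _ _ _ _ ?_
  intro acc kv _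
  by_cases hlen : kv.2.length ≤ 1
  · simp [hlen]
  · simp only [if_neg hlen, scan_group_eq]
    have hty : kv.2.map (fun r => relGet r "type") = kv.2.map typeOf := rfl
    simp only [hty, outer_char]
    -- detected component
    have hsum := sum_cnt_gen (kv.2.map typeOf) []
    simp only [List.length_nil, Nat.cast_zero, List.nil_append] at hsum
    -- keep component
    have hkeep := keep_gen
      ((PySem.List.enumerate (kv.2.map typeOf) 0).foldl
        (fun s p => if cnt p.1 p.2 (kv.2.map typeOf) 0 = 0 then s else s.add p.1)
        PySem.Set.empty)
      kv.2 [] acc.1 ?_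
    · simp only [List.length_nil, Nat.cast_zero] at hkeep
      rw [hkeep, hsum, dStr_map]
    · intro m hm
      simp only [List.length_nil, Nat.zero_add]
      rw [setfold_contains]
      have hm' : m < (kv.2.map typeOf).length := by simpa using hm
      rw [show ((PySem.Set.empty : PySem.Set Int).contains ((m : Nat) : Int)) = false from rfl,
        Bool.false_or,
        any_enumerate_at _ m hm' (fun p => !(cnt p.1 p.2 (kv.2.map typeOf) 0 == 0)),
        cnt_drop _ _ _ hm']
      simp [badN, List.getElem_map]

theorem main_eq (relationships : List (List (String × String))) :
    resolve_intra_batch_py relationships = resolve_intra_batch_py_alt relationships := by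
  unfold resolve_intra_batch_py resolve_intra_batch_py_alt
  exact groups_eq _

-- ===== VERDICT (by name: the statement is the Claim_ definition above) =====
theorem resolve_intra_batch_py_spec : Claim_equal_resolve_intra_batch_py := by
  intro relationships _
  unfold Spec_resolve_intra_batch_py
  exact main_eq relationships
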